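-- pv_equiv track=rewrite | github.com/pakistan/aiperture | aiperture/permissions/risk.py | _detect_pipe_to_exec
-- ===== SOURCE A (Python) =====
-- _PIPE_EXECUTORS = frozenset(
--     {
--         "sh",
--         "bash",
--         "zsh",
--         "python",
--         "python3",
--         "perl",
--         "ruby",
--         "node",
--     }
-- )
--
-- def _detect_pipe_to_exec(scope: str) -> bool:
--     """Detect pipe-to-execution patterns: command | sh, curl url | bash, etc."""
--     if "|" not in scope:
--         return False
--
--     # Split on pipe and check the right side
--     parts = scope.split("|")
--     for part in parts[1:]:  # everything after the first pipe
--         target = part.strip().split()[0].lower() if part.strip() else ""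
--         if target in _PIPE_EXECUTORS:
--             return True
--     return False
-- ===== SOURCE B (Python) =====
-- _PIPE_EXECUTORS = frozenset(
--     {
--         "sh",
--         "bash",
--         "zsh",
--         "python",
--         "python3",
--         "perl",
--         "ruby",
--         "node",
--     }
-- )
--
--
-- def _detect_pipe_to_exec(scope: str) -> bool:
--     """Single left-to-right character scan: after each '|', skip whitespace,
--     read the next token (up to whitespace or the next '|') and test it."""
--     i, n = 0, len(scope)
--     while i < n:
--         if scope[i] != "|":
--             i += 1
--             continue
--         i += 1
--         while i < n and scope[i].isspace():
--             i += 1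
--         j = i
--         while j < n and not scope[j].isspace() and scope[j] != "|":
--             j += 1
--         if scope[i:j].lower() in _PIPE_EXECUTORS:
--             return True
--         i = j
--     return False
-- ===== Notes on version B (the rewrite author's own statement) =====
-- stated objective: alternative
-- what changed: Replaced split-on-pipe plus per-segment strip/split/index with a single left-to-right character scan that, after each pipe, skips whitespace and reads the next token in place, so no intermediate segment or word lists are built.
import Mathlib
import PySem

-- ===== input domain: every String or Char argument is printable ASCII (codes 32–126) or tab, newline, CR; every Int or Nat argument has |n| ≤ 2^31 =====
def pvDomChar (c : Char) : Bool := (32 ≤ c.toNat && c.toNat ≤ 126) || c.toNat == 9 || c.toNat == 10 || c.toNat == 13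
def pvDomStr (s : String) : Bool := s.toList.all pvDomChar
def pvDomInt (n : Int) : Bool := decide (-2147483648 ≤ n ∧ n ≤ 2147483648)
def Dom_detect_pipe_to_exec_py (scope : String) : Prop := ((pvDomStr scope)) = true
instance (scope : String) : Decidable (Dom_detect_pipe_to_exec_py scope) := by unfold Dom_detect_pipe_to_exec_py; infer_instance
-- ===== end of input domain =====

-- B replaces split-on-pipe + per-segment strip/split by a single character scan; same values everywhere (alternative, not claimed faster).

-- ===== PORT A =====
-- the frozenset _PIPE_EXECUTORS (distinct elements, membership only)
def pvExecs : List (List Char) :=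
  ["sh".toList, "bash".toList, "zsh".toList, "python".toList,
   "python3".toList, "perl".toList, "ruby".toList, "node".toList]

-- the 'for part in parts[1:]' loop with its early return
def pvALoop : List (List Char) → Bool
  | [] => false
  | part :: rest =>
    let st := PySem.Chars.strip part
    -- part.strip().split()[0].lower() if part.strip() else "" ; the [0] is guarded: st ≠ [] makes split₀ st nonempty
    let target := if st.isEmpty then [] else PySem.Chars.lower ((PySem.Chars.split₀ st).headD [])
    if pvExecs.contains target then true else pvALoop rest

def detect_pipe_to_exec_py (scope : String) : Bool :=
  if PySem.Str.isIn "|" scope = false then false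
  else pvALoop (PySem.List.slice (PySem.Chars.splitOn scope.toList ['|']) (some 1) none)

-- ===== PORT B =====
-- Source B's single scan: on '|', skip whitespace (the i-loop), take the token (the j-loop), test, continue at j
def pvScan : List Char → Bool
  | [] => false
  | c :: r =>
    if c = '|' then
      let afterWs := r.dropWhile PySem.Chars.isspace
      let tok := afterWs.takeWhile (fun d => !PySem.Chars.isspace d && d != '|')
      if pvExecs.contains (PySem.Chars.lower tok) then true
      else pvScan (afterWs.dropWhile (fun d => !PySem.Chars.isspace d && d != '|'))
    else pvScan r
termination_by l => l.length
decreasing_by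
  · simp only [List.length_cons]
    have h1 := List.length_dropWhile_le (p := fun d => !PySem.Chars.isspace d && d != '|') (l := r.dropWhile PySem.Chars.isspace)
    have h2 := List.length_dropWhile_le (p := PySem.Chars.isspace) (l := r)
    omega
  · simp

def detect_pipe_to_exec_py_alt (scope : String) : Bool := pvScan scope.toList

-- ===== PRECONDITION & SPEC =====
def Spec_detect_pipe_to_exec_py (scope : String) (out : Bool) : Prop := out = detect_pipe_to_exec_py_alt scope
instance (scope : String) (out : Bool) : Decidable (Spec_detect_pipe_to_exec_py scope out) := by unfold Spec_detect_pipe_to_exec_py; infer_instance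

-- ===== CLAIM (what is proved, stated in full; the proofs are below) =====
def Claim_equal_detect_pipe_to_exec_py : Prop := ∀ (scope : String), Dom_detect_pipe_to_exec_py scope → Spec_detect_pipe_to_exec_py scope (detect_pipe_to_exec_py scope)

-- ===== LEMMAS AND PROOFS =====

-- ---------- structural split on '|' ----------
def pvSplit : List Char → List (List Char)
  | [] => [[]]
  | c :: r =>
    let ps := pvSplit r
    if c = '|' then [] :: ps else (c :: ps.headD []) :: ps.tail

theorem pvSplit_ne_nil (l : List Char) : pvSplit l ≠ [] := by
  cases l <;> simp [pvSplit] <;> split <;> simp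

theorem pvSplit_cons_head_tail (l : List Char) : pvSplit l = (pvSplit l).headD [] :: (pvSplit l).tail := by
  cases h : pvSplit l with
  | nil => exact absurd h (pvSplit_ne_nil l)
  | cons a t => simp

theorem pvSplit_eq (r : List Char) :
    pvSplit r = (r.takeWhile (· != '|')) ::
      (match r.dropWhile (· != '|') with
       | [] => []
       | _ :: r' => pvSplit r') := by
  induction r with
  | nil => simp [pvSplit]
  | cons c t ih =>
    by_cases hc : c = '|'
    · subst hc; simp [pvSplit, List.takeWhile_cons, List.dropWhile_cons]
    · simp only [pvSplit, List.takeWhile_cons, List.dropWhile_cons, bne_iff_ne, ne_eq, hc,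
        not_false_eq_true, if_true, if_neg hc]
      rw [ih]
      simp

-- splitOn.go for single-char sep equals pvSplit
theorem pvSplitOn_go (fuel : Nat) (l cur : List Char) (acc : List (List Char)) (h : l.length ≤ fuel) :
    PySem.Chars.splitOn.go ['|'] fuel l cur acc =
      acc.reverse ++ ((cur.reverse ++ (pvSplit l).headD []) :: (pvSplit l).tail) := by
  induction fuel generalizing l cur acc with
  | zero =>
    have hl : l = [] := List.eq_nil_of_length_eq_zero (by omega)
    subst hl
    simp [PySem.Chars.splitOn.go, pvSplit]
  | succ f ih =>
    cases l with
    | nil => simp [PySem.Chars.splitOn.go, pvSplit]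
    | cons c r =>
      simp only [List.length_cons] at h
      by_cases hc : c = '|'
      · subst hc
        rw [show PySem.Chars.splitOn.go ['|'] (f+1) ('|'::r) cur acc =
              PySem.Chars.splitOn.go ['|'] f (List.drop 1 ('|'::r)) [] (cur.reverse :: acc) by
            simp [PySem.Chars.splitOn.go, List.isPrefixOf]]
        simp only [List.drop_succ_cons, List.drop_zero]
        rw [ih r [] (cur.reverse :: acc) (by omega)]
        simp [pvSplit]
        rw [← List.headD_eq_head?_getD]
        exact (pvSplit_cons_head_tail r).symm
      · rw [show PySem.Chars.splitOn.go ['|'] (f+1) (c::r) cur acc =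
              PySem.Chars.splitOn.go ['|'] f r (c :: cur) acc by
            simp [PySem.Chars.splitOn.go, List.isPrefixOf, Ne.symm hc]]
        rw [ih r (c :: cur) acc (by omega)]
        simp [pvSplit, hc]

theorem pvSplitOn_eq (l : List Char) : PySem.Chars.splitOn l ['|'] = pvSplit l := by
  unfold PySem.Chars.splitOn
  rw [pvSplitOn_go (l.length + 1) l [] [] (by omega)]
  simpa using (pvSplit_cons_head_tail l).symm

-- ---------- A's per-segment target ----------
-- split₀.go with nonempty acc prepends acc.reverse
theorem pvSplit0_go_acc (l cur : List Char) (acc : List (List Char)) :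
    PySem.Chars.split₀.go l cur acc = acc.reverse ++ PySem.Chars.split₀.go l cur [] := by
  induction l generalizing cur acc with
  | nil => by_cases h : cur.isEmpty <;> simp [PySem.Chars.split₀.go, h]
  | cons c t ih =>
    by_cases hs : PySem.Chars.isspace c
    · by_cases h : cur.isEmpty
      · simp only [PySem.Chars.split₀.go, hs, h, if_true]
        rw [ih]
      · simp only [PySem.Chars.split₀.go, hs, h, if_true, Bool.false_eq_true, if_false]
        rw [ih [] [cur.reverse], ih [] (cur.reverse :: acc)]
        simp
    · simp only [PySem.Chars.split₀.go, hs, Bool.false_eq_true, if_false]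
      rw [ih (c :: cur) acc]

theorem pvSplit0_go_first (l cur : List Char) (h : cur ≠ []) :
    (PySem.Chars.split₀.go l cur []).headD [] =
      cur.reverse ++ l.takeWhile (fun d => !PySem.Chars.isspace d) := by
  induction l generalizing cur with
  | nil => simp [PySem.Chars.split₀.go, List.isEmpty_iff, h]
  | cons c t ih =>
    by_cases hs : PySem.Chars.isspace c
    · simp only [PySem.Chars.split₀.go, hs, if_true, List.isEmpty_iff, h, if_false,
        List.takeWhile_cons, Bool.not_true, Bool.false_eq_true]
      rw [pvSplit0_go_acc]
      simp
    · simp only [PySem.Chars.split₀.go, hs, Bool.false_eq_true, if_false, List.takeWhile_cons,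
        Bool.not_false, if_true]
      rw [ih (c :: cur) (by simp)]
      simp

-- python's word head: first whitespace-delimited token
def pvWordHead (l : List Char) : List Char :=
  (l.dropWhile PySem.Chars.isspace).takeWhile (fun d => !PySem.Chars.isspace d)

theorem pvTakeWhile_append_spaces (a sp : List Char) (hsp : ∀ c ∈ sp, PySem.Chars.isspace c) :
    (a ++ sp).takeWhile (fun d => !PySem.Chars.isspace d) = a.takeWhile (fun d => !PySem.Chars.isspace d) := by
  induction a with
  | nil =>
    cases sp with
    | nil => simp
    | cons x y => simp [List.takeWhile_cons, hsp x (by simp)]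
  | cons x a' ih =>
    by_cases hx : PySem.Chars.isspace x <;> simp [List.takeWhile_cons, hx, ih]

theorem pvRstrip_decomp (l : List Char) :
    ∃ sp, l = PySem.Chars.rstrip l ++ sp ∧ ∀ c ∈ sp, PySem.Chars.isspace c := by
  refine ⟨(l.reverse.takeWhile PySem.Chars.isspace).reverse, ?_, ?_⟩
  · have hr : PySem.Chars.rstrip l = (l.reverse.dropWhile PySem.Chars.isspace).reverse := rfl
    rw [hr, ← List.reverse_append, List.takeWhile_append_dropWhile, List.reverse_reverse]
  · intro c hc
    exact List.mem_takeWhile_imp (by simpa using hc)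

theorem pvTakeWhile_rstrip (l : List Char) :
    (PySem.Chars.rstrip l).takeWhile (fun d => !PySem.Chars.isspace d) =
      l.takeWhile (fun d => !PySem.Chars.isspace d) := by
  obtain ⟨sp, hl, hsp⟩ := pvRstrip_decomp l
  conv_rhs => rw [hl]
  rw [pvTakeWhile_append_spaces _ _ hsp]

-- A's target (before lowering) is pvWordHead
theorem pvTarget_eq (s : List Char) :
    (if (PySem.Chars.strip s).isEmpty then []
     else (PySem.Chars.split₀ (PySem.Chars.strip s)).headD []) = pvWordHead s := by
  cases h : s.dropWhile PySem.Chars.isspace with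
  | nil =>
    have hstrip : PySem.Chars.strip s = [] := by
      simp [PySem.Chars.strip, PySem.Chars.lstrip, h, PySem.Chars.rstrip]
    simp [hstrip, pvWordHead, h]
  | cons d t =>
    have hd : PySem.Chars.isspace d = false := by
      have := List.head_dropWhile_not PySem.Chars.isspace (l := s) (by simp [h])
      simpa [h] using this
    have hstrip : PySem.Chars.strip s = PySem.Chars.rstrip (d :: t) := by
      simp [PySem.Chars.strip, PySem.Chars.lstrip, h]
    obtain ⟨sp, hl, hsp⟩ := pvRstrip_decomp (d :: t)
    have hne : PySem.Chars.rstrip (d :: t) ≠ [] := by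
      intro h0
      rw [h0] at hl
      simp only [List.nil_append] at hl
      have : PySem.Chars.isspace d := hsp d (by rw [← hl]; simp)
      simp [this] at hd
    obtain ⟨d', u, hdu⟩ := List.exists_cons_of_ne_nil hne
    have hd' : d' = d := by
      rw [hdu] at hl
      have := congrArg (List.headD · ' ') hl
      simpa using this.symm
    rw [hd'] at hdu
    rw [hstrip, hdu]
    have hsplit : (PySem.Chars.split₀ (d :: u)).headD [] =
        (d :: u).takeWhile (fun e => !PySem.Chars.isspace e) := by
      have : PySem.Chars.split₀ (d :: u) = PySem.Chars.split₀.go u [d] [] := by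
        simp [PySem.Chars.split₀, PySem.Chars.split₀.go, hd]
      rw [this, pvSplit0_go_first u [d] (by simp)]
      simp [List.takeWhile_cons, hd]
    rw [hsplit, ← hdu, pvTakeWhile_rstrip]
    simp only [pvWordHead, h]
    simp [hdu]

-- ---------- relating B's token to A's target ----------
theorem pvIsspace_pipe : PySem.Chars.isspace '|' = false := by decide

theorem pvTok_eq (r : List Char) :
    pvWordHead (r.takeWhile (· != '|')) =
      (r.dropWhile PySem.Chars.isspace).takeWhile (fun d => !PySem.Chars.isspace d && d != '|') := by
  induction r with
  | nil => simp [pvWordHead]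
  | cons c r' ih =>
    by_cases hc : c = '|'
    · subst hc
      simp [pvWordHead, List.takeWhile_cons, List.dropWhile_cons, pvIsspace_pipe]
    · by_cases hs : PySem.Chars.isspace c
      · simpa [pvWordHead, List.takeWhile_cons, List.dropWhile_cons, hc, hs] using ih
      · simp only [pvWordHead, List.takeWhile_cons, List.dropWhile_cons, bne_iff_ne, ne_eq, hc,
          not_false_eq_true, decide_true, hs, Bool.false_eq_true, if_false, Bool.not_false,
          Bool.true_and, if_true]
        rw [List.takeWhile_takeWhile]
        have hpq : (fun a => decide ((!PySem.Chars.isspace a) = true ∧ (a != '|') = true)) =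
            (fun d => !PySem.Chars.isspace d && (d != '|')) := by
          funext a
          cases ha : PySem.Chars.isspace a <;> by_cases h2 : a = '|' <;> simp [ha, h2]
        rw [hpq]

-- ---------- B's scan skips non-pipe characters ----------
theorem pvScan_dropWhile (l : List Char) : pvScan l = pvScan (l.dropWhile (· != '|')) := by
  induction l with
  | nil => simp
  | cons c r ih =>
    by_cases hc : c = '|'
    · subst hc; simp [List.dropWhile_cons]
    · rw [show pvScan (c :: r) = pvScan r by simp [pvScan, hc]]
      simpa [List.dropWhile_cons, hc] using ih

theorem pvDropWhile_append (a b : List Char) (ha : ∀ c ∈ a, c ≠ '|') :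
    (a ++ b).dropWhile (· != '|') = b.dropWhile (· != '|') := by
  induction a with
  | nil => simp
  | cons x a' ih =>
    simp only [List.cons_append, List.dropWhile_cons, bne_iff_ne, ne_eq,
      ha x (by simp), not_false_eq_true, decide_true, if_true]
    exact ih (fun c hc => ha c (by simp [hc]))

-- ---------- main lemma ----------
theorem pvMain (l : List Char) : pvScan l = pvALoop ((pvSplit l).tail) := by
  induction hn : l.length using Nat.strong_induction_on generalizing l with
  | _ n ih =>
  cases l with
  | nil => simp [pvScan, pvSplit, pvALoop]
  | cons c r =>
    by_cases hc : c = '|'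
    case neg =>
      rw [show pvScan (c :: r) = pvScan r by simp [pvScan, hc]]
      rw [show pvSplit (c :: r) = (c :: (pvSplit r).headD []) :: (pvSplit r).tail by simp [pvSplit, hc]]
      simp only [List.tail_cons]
      rw [← List.tail_cons (a := (pvSplit r).headD []) (as := (pvSplit r).tail), ← pvSplit_cons_head_tail r]
      exact ih (r.length) (by simp [← hn]) r rfl
    case pos =>
      subst hc
      rw [show pvSplit ('|' :: r) = [] :: pvSplit r by simp [pvSplit]]
      simp only [List.tail_cons]
      rw [pvSplit_eq r, pvALoop]
      rw [show pvScan ('|' :: r) =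
        (if pvExecs.contains (PySem.Chars.lower ((r.dropWhile PySem.Chars.isspace).takeWhile (fun d => !PySem.Chars.isspace d && d != '|'))) then true
         else pvScan ((r.dropWhile PySem.Chars.isspace).dropWhile (fun d => !PySem.Chars.isspace d && d != '|'))) by rw [pvScan]; simp]
      have htarget :
          (if (PySem.Chars.strip (r.takeWhile (· != '|'))).isEmpty then ([] : List Char)
           else PySem.Chars.lower ((PySem.Chars.split₀ (PySem.Chars.strip (r.takeWhile (· != '|')))).headD [])) =
          PySem.Chars.lower ((r.dropWhile PySem.Chars.isspace).takeWhile (fun d => !PySem.Chars.isspace d && d != '|')) := by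
        rw [← pvTok_eq r, ← pvTarget_eq (r.takeWhile (· != '|'))]
        by_cases h : (PySem.Chars.strip (r.takeWhile (· != '|'))).isEmpty <;>
          simp [h, PySem.Chars.lower]
      simp only [htarget]
      by_cases hcond : PySem.Chars.lower ((r.dropWhile PySem.Chars.isspace).takeWhile (fun d => !PySem.Chars.isspace d && d != '|')) ∈ pvExecs
      · simp [hcond]
      · simp only [List.contains_eq_mem, hcond, decide_false, Bool.false_eq_true, if_false]
        -- else branches: continue the scan = loop over the remaining segments
        have hdrop : ((r.dropWhile PySem.Chars.isspace).dropWhile (fun d => !PySem.Chars.isspace d && d != '|')).dropWhile (· != '|')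
            = r.dropWhile (· != '|') := by
          conv_rhs => rw [← List.takeWhile_append_dropWhile (p := PySem.Chars.isspace) (l := r)]
          rw [pvDropWhile_append _ _ (fun x hx => by
            have := List.mem_takeWhile_imp hx
            intro he; rw [he] at this; simp [pvIsspace_pipe] at this)]
          conv_rhs => rw [← List.takeWhile_append_dropWhile
            (p := fun d => !PySem.Chars.isspace d && d != '|') (l := r.dropWhile PySem.Chars.isspace)]
          rw [pvDropWhile_append _ _ (fun x hx => by
            have := List.mem_takeWhile_imp hx
            simpa using (Bool.and_elim_right this))]
        rw [pvScan_dropWhile, hdrop]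
        cases hr : r.dropWhile (· != '|') with
        | nil => simp [pvScan, pvALoop]
        | cons x r' =>
          have hx : x = '|' := by
            have := List.head_dropWhile_not (fun d => d != '|') (l := r) (by simp [hr])
            simpa [hr] using this
          subst hx
          have hlen : ('|' :: r').length < n := by
            have h1 : (('|' :: r') : List Char).length ≤ r.length := by
              rw [← hr]; exact List.length_dropWhile_le _ _
            have hn' : r.length + 1 = n := by simpa using hn
            simp only [List.length_cons] at h1 ⊢
            omega
          rw [ih (('|' :: r').length) hlen ('|' :: r') rfl]
          rw [show pvSplit ('|' :: r') = [] :: pvSplit r' by simp [pvSplit]]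
          simp

theorem pvScan_no_pipe (l : List Char) (h : '|' ∉ l) : pvScan l = false := by
  induction l with
  | nil => simp [pvScan]
  | cons c r ih =>
    have hc : c ≠ '|' := fun he => h (by simp [he])
    rw [show pvScan (c :: r) = pvScan r by simp [pvScan, hc]]
    exact ih (fun hm => h (by simp [hm]))

theorem pvTop (scope : String) : (if PySem.Str.isIn "|" scope = false then false
    else pvALoop (PySem.List.slice (PySem.Chars.splitOn scope.toList ['|']) (some 1) none)) = pvScan scope.toList := by
  by_cases h : PySem.Str.isIn "|" scope = false
  · rw [if_pos h]
    refine (pvScan_no_pipe scope.toList ?_).symm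
    simp only [PySem.Str.isIn] at h
    rw [PySem.Chars.isIn_eq_false_iff] at h
    intro hm
    apply h
    obtain ⟨a, b, hab⟩ := List.mem_iff_append.mp hm
    have h1 : ("|".toList : List Char) = ['|'] := rfl
    rw [hab, h1]
    exact ⟨a, b, by simp⟩
  · rw [if_neg h]
    have hslice : PySem.List.slice (PySem.Chars.splitOn scope.toList ['|']) (some 1) none
        = (PySem.Chars.splitOn scope.toList ['|']).drop 1 := by
      have := PySem.List.slice_from (xs := PySem.Chars.splitOn scope.toList ['|']) (a := (1:Nat)) (by norm_num)
      simpa using this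
    rw [hslice, pvSplitOn_eq]
    rw [show (pvSplit scope.toList).drop 1 = (pvSplit scope.toList).tail from List.drop_one]
    exact (pvMain scope.toList).symm


-- ===== VERDICT (by name: the statement is the Claim_ definition above) =====
theorem detect_pipe_to_exec_py_spec : Claim_equal_detect_pipe_to_exec_py := by
  unfold Claim_equal_detect_pipe_to_exec_py Spec_detect_pipe_to_exec_py
  intro scope _
  unfold detect_pipe_to_exec_py detect_pipe_to_exec_py_alt
  exact pvTop scope
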